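-- pv_equiv track=rewrite | github.com/Pushkarmehra/smart-scheduling-system-master | backend/app.py | _resolve_room_for_move
-- ===== SOURCE A (Python) =====
-- def _resolve_room_for_move(timetable, class_id, day, slot, preferred_room):
--     def room_type(room_name):
--         token = str(room_name or '').upper()
--         if 'CL' in token:
--             return 'lab'
--         if 'LT' in token:
--             return 'lecture'
--         return 'other'
--
--     used_rooms = {
--         c.get('room')
--         for c in timetable
--         if c.get('id') != class_id and c.get('day') == day and c.get('timeSlot') == slot
--     }
--
--     current = next((c for c in timetable if c.get('id') == class_id), None)
--     source_type = room_type(current.get('room') if current else preferred_room)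
--
--     def is_compatible(room_name):
--         if source_type == 'other':
--             return True
--         return room_type(room_name) == source_type
--
--     if preferred_room and preferred_room not in used_rooms and is_compatible(preferred_room):
--         return preferred_room
--
--     known_rooms = sorted({c.get('room') for c in timetable if c.get('room')})
--     for room in known_rooms:
--         if room not in used_rooms and is_compatible(room):
--             return room
--
--     return None
-- ===== SOURCE B (Python) =====
-- def _resolve_room_for_move(timetable, class_id, day, slot, preferred_room):
--     def room_type(room_name):
--         token = str(room_name or '').upper()
--         if 'CL' in token:
--             return 'lab'
--         if 'LT' in token:
--             return 'lecture'
--         return 'other'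
--
--     # One pass over the timetable gathers everything at once: the rooms used in the
--     # target (day, slot) by other classes, the moved class's own room, and the list
--     # of truthy room names in order.
--     used = set()
--     have_current = False
--     current_room = None
--     rooms = []
--     for c in timetable:
--         r = c.get('room')
--         if c.get('id') == class_id:
--             if not have_current:
--                 have_current = True
--                 current_room = r
--         elif c.get('day') == day and c.get('timeSlot') == slot:
--             used.add(r)
--         if r:
--             rooms.append(r)
--
--     source_type = room_type(current_room if have_current else preferred_room)
--
--     def is_compatible(room_name):
--         return source_type == 'other' or room_type(room_name) == source_type
--
--     if preferred_room and preferred_room not in used and is_compatible(preferred_room):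
--         return preferred_room
--
--     # Running-minimum selection instead of building a distinct set, sorting and scanning.
--     best = None
--     for r in rooms:
--         if r not in used and is_compatible(r) and (best is None or r < best):
--             best = r
--     return best
-- ===== Notes on version B (the rewrite author's own statement) =====
-- stated objective: alternative
-- what changed: B replaces A's three separate comprehensions plus sort-and-first-fit-scan by one single pass over the timetable accumulating (used rooms, current class's room, truthy room list) in one loop, and then picks the answer with a running-minimum scan instead of sorting the distinct room set and scanning it.
import Mathlib
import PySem

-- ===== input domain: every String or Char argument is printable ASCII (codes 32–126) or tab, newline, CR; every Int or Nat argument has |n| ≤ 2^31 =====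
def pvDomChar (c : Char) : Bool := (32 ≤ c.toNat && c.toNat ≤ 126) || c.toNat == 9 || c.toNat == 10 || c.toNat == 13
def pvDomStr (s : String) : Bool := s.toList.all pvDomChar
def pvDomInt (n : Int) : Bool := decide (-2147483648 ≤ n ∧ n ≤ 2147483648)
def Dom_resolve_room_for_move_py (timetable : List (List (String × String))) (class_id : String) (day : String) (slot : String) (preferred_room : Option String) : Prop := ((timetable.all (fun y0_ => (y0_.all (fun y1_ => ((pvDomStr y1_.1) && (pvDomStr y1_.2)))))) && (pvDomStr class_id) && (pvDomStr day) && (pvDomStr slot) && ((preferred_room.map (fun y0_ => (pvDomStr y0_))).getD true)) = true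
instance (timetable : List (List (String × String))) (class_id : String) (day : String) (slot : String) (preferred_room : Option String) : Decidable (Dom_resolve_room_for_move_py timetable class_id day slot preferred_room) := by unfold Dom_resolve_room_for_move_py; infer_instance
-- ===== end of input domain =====

-- B gathers used rooms / current room / truthy room list in ONE pass and selects the
-- answer by a running minimum instead of A's staged comprehensions + sort + first-fit
-- scan (objective: alternative algorithm, same result).

-- ===== PORT A =====
-- helpers both Python versions literally contain (c.get, room_type, is_compatible)

-- c.get(k) on the dict-as-association-list (first match)
def pvGetKey (c : List (String × String)) (k : String) : Option String :=
  (c.find? (fun kv => kv.1 == k)).map (fun kv => kv.2)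

-- room_type(room_name): token = str(room_name or '').upper(); 'CL' → lab, 'LT' → lecture
def pvRoomType (room_name : Option String) : String :=
  let token := PySem.Str.upper (room_name.getD "")
  if PySem.Str.isIn "CL" token then "lab"
  else if PySem.Str.isIn "LT" token then "lecture"
  else "other"

-- is_compatible(room_name)
def pvCompat (source_type : String) (room_name : Option String) : Bool :=
  (source_type == "other") || (pvRoomType room_name == source_type)

-- A's used_rooms comprehension
def pvUsedRooms (timetable : List (List (String × String))) (class_id : String) (day : String) (slot : String) : PySem.Set (Option String) :=
  PySem.Set.ofList ((timetable.filter (fun c =>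
    (pvGetKey c "id" != some class_id) && (pvGetKey c "day" == some day) && (pvGetKey c "timeSlot" == some slot))).map
      (fun c => pvGetKey c "room"))

-- source_type = room_type(current.get('room') if current else preferred_room)
def pvSourceType (timetable : List (List (String × String))) (class_id : String) (preferred_room : Option String) : String :=
  pvRoomType (match timetable.find? (fun c => pvGetKey c "id" == some class_id) with
              | some c => pvGetKey c "room"
              | none => preferred_room)

-- 'if preferred_room and preferred_room not in used_rooms and is_compatible(preferred_room)'
def pvPrefOk (used : PySem.Set (Option String)) (source_type : String) (preferred_room : Option String) : Bool :=
  match preferred_room with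
  | none => false
  | some p => (p != "") && !(PySem.Set.contains used (some p)) && pvCompat source_type (some p)

-- 'c.get('room')' when truthy (the comprehension filter 'if c.get('room')')
def pvTruthyRoom (c : List (String × String)) : Option String :=
  match pvGetKey c "room" with
  | some r => if r == "" then none else some r
  | none => none

-- A's final loop: 'for room in known_rooms: if …: return room; return None'
def pvFirstFit (p : String → Bool) : List String → Option String
  | [] => none
  | r :: rest => if p r then some r else pvFirstFit p rest

def resolve_room_for_move_py (timetable : List (List (String × String))) (class_id : String) (day : String) (slot : String) (preferred_room : Option String) : Option String :=
  let used := pvUsedRooms timetable class_id day slot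
  let st := pvSourceType timetable class_id preferred_room
  if pvPrefOk used st preferred_room then preferred_room
  else
    let known := PySem.List.sorted (PySem.Set.ofList (timetable.filterMap pvTruthyRoom)) (fun x => x) false
    pvFirstFit (fun r => !(PySem.Set.contains used (some r)) && pvCompat st (some r)) known

-- ===== PORT B =====
-- one step of B's single gathering loop over the timetable; state =
-- (used rooms so far, first room of class_id if seen, truthy rooms in order)
def pvBStep (class_id : String) (day : String) (slot : String)
    (acc : PySem.Set (Option String) × Option (Option String) × List String)
    (c : List (String × String)) : PySem.Set (Option String) × Option (Option String) × List String :=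
  let r := pvGetKey c "room"
  let uc : PySem.Set (Option String) × Option (Option String) :=
    if pvGetKey c "id" == some class_id then
      (acc.1, if acc.2.1.isNone then some r else acc.2.1)
    else if (pvGetKey c "day" == some day) && (pvGetKey c "timeSlot" == some slot) then
      (PySem.Set.add acc.1 r, acc.2.1)
    else (acc.1, acc.2.1)
  let rooms := match r with
    | some s => if s == "" then acc.2.2 else acc.2.2 ++ [s]
    | none => acc.2.2
  (uc.1, uc.2, rooms)

-- the code after B's loop: preferred-room check, then the running-minimum selection
def pvBChoose (used : PySem.Set (Option String)) (st : String) (rooms : List String) (preferred_room : Option String) : Option String :=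
  if (match preferred_room with
      | none => false
      | some p => (p != "") && !(PySem.Set.contains used (some p)) && pvCompat st (some p)) then
    preferred_room
  else
    -- best = None; for r in rooms: if ok and (best is None or r < best): best = r
    rooms.foldl (fun best r =>
      if (!(PySem.Set.contains used (some r)) && pvCompat st (some r)) &&
         (match best with | none => true | some b => decide (r < b)) then some r else best) none

def resolve_room_for_move_py_alt (timetable : List (List (String × String))) (class_id : String) (day : String) (slot : String) (preferred_room : Option String) : Option String :=
  match timetable.foldl (pvBStep class_id day slot) (PySem.Set.ofList [], none, []) with
  | (used, cur, rooms) =>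
      pvBChoose used (pvRoomType (match cur with | some r => r | none => preferred_room)) rooms preferred_room

-- ===== PRECONDITION & SPEC =====
def Spec_resolve_room_for_move_py (timetable : List (List (String × String))) (class_id : String) (day : String) (slot : String) (preferred_room : Option String) (out : Option String) : Prop := out = resolve_room_for_move_py_alt timetable class_id day slot preferred_room
instance (timetable : List (List (String × String))) (class_id : String) (day : String) (slot : String) (preferred_room : Option String) (out : Option String) : Decidable (Spec_resolve_room_for_move_py timetable class_id day slot preferred_room out) := by unfold Spec_resolve_room_for_move_py; infer_instance

-- ===== CLAIM (what is proved, stated in full; the proofs are below) =====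
def Claim_equal_resolve_room_for_move_py : Prop := ∀ (timetable : List (List (String × String))) (class_id : String) (day : String) (slot : String) (preferred_room : Option String), Dom_resolve_room_for_move_py timetable class_id day slot preferred_room → Spec_resolve_room_for_move_py timetable class_id day slot preferred_room (resolve_room_for_move_py timetable class_id day slot preferred_room)

-- ===== LEMMAS AND PROOFS =====

-- the predicate of A's used_rooms comprehension
def pvUsedCond (class_id day slot : String) (c : List (String × String)) : Bool :=
  (pvGetKey c "id" != some class_id) && (pvGetKey c "day" == some day) && (pvGetKey c "timeSlot" == some slot)

-- B's pass: the rooms component is the truthy-room list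
theorem pvBScan_rooms (class_id day slot : String) (t : List (List (String × String)))
    (acc : PySem.Set (Option String) × Option (Option String) × List String) :
    (t.foldl (pvBStep class_id day slot) acc).2.2 = acc.2.2 ++ t.filterMap pvTruthyRoom := by
  induction t generalizing acc with
  | nil => simp
  | cons c t ih =>
      rw [List.foldl_cons, ih, List.filterMap_cons]
      cases hr : pvGetKey c "room" with
      | none => simp [pvBStep, pvTruthyRoom, hr]
      | some s2 => by_cases hs : s2 = "" <;> simp [pvBStep, pvTruthyRoom, hr, hs]

-- B's pass: the current-room component is A's next(...) lookup
theorem pvBScan_cur (class_id day slot : String) (t : List (List (String × String)))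
    (acc : PySem.Set (Option String) × Option (Option String) × List String) :
    (t.foldl (pvBStep class_id day slot) acc).2.1 =
      (match acc.2.1 with
       | some x => some x
       | none => (t.find? (fun c => pvGetKey c "id" == some class_id)).map (fun c => pvGetKey c "room")) := by
  induction t generalizing acc with
  | nil => cases hc : acc.2.1 <;> simp [hc]
  | cons c t ih =>
      rw [List.foldl_cons, ih]
      by_cases hid : (pvGetKey c "id" == some class_id) = true
      · cases hc : acc.2.1 with
        | none => simp [pvBStep, hid, hc]
        | some x => simp [pvBStep, hid, hc]
      · have hid' : (pvGetKey c "id" == some class_id) = false := eq_false_of_ne_true hid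
        rw [List.find?_cons_of_neg (by simp [hid'])]
        by_cases hds : ((pvGetKey c "day" == some day) && (pvGetKey c "timeSlot" == some slot)) = true
        · cases hc : acc.2.1 <;> simp [pvBStep, hid', hds, hc]
        · have hds' := eq_false_of_ne_true hds
          cases hc : acc.2.1 <;> simp [pvBStep, hid', hds', hc]

-- B's pass: the used component is the fold of A's filtered list
theorem pvBScan_used (class_id day slot : String) (t : List (List (String × String)))
    (acc : PySem.Set (Option String) × Option (Option String) × List String) :
    (t.foldl (pvBStep class_id day slot) acc).1 =
      (t.filter (pvUsedCond class_id day slot)).foldl (fun u c => PySem.Set.add u (pvGetKey c "room")) acc.1 := by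
  induction t generalizing acc with
  | nil => simp
  | cons c t ih =>
      rw [List.foldl_cons, ih]
      by_cases hid : (pvGetKey c "id" == some class_id) = true
      · have hcond : pvUsedCond class_id day slot c = false := by
          simp [pvUsedCond, bne, hid]
        rw [List.filter_cons_of_neg (by simp [hcond])]
        simp [pvBStep, hid]
      · have hid' : (pvGetKey c "id" == some class_id) = false := eq_false_of_ne_true hid
        by_cases hds : ((pvGetKey c "day" == some day) && (pvGetKey c "timeSlot" == some slot)) = true
        · obtain ⟨h2, h3⟩ := Bool.and_eq_true_iff.mp hds
          have hcond : pvUsedCond class_id day slot c = true := by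
            simp [pvUsedCond, bne, hid', h2, h3]
          rw [List.filter_cons_of_pos (by simp [hcond]), List.foldl_cons]
          simp [pvBStep, hid', hds]
        · have hds' := eq_false_of_ne_true hds
          have hcond : pvUsedCond class_id day slot c = false := by
            by_cases h2 : (pvGetKey c "day" == some day) = true
            · have h3 : (pvGetKey c "timeSlot" == some slot) = false := by
                cases h : (pvGetKey c "timeSlot" == some slot) with
                | true => rw [h2, h] at hds'; simp at hds'
                | false => rfl
              simp [pvUsedCond, h3]
            · have h2' : (pvGetKey c "day" == some day) = false := eq_false_of_ne_true h2
              simp [pvUsedCond, h2']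
          rw [List.filter_cons_of_neg (by simp [hcond])]
          simp [pvBStep, hid', hds']

-- the three components at B's initial accumulator
theorem pvBScan_used0 (timetable : List (List (String × String))) (class_id day slot : String) :
    (timetable.foldl (pvBStep class_id day slot) (PySem.Set.ofList [], none, [])).1 =
      pvUsedRooms timetable class_id day slot := by
  rw [pvBScan_used]
  unfold pvUsedRooms pvUsedCond
  simp [PySem.Set.ofList_eq_foldl, List.foldl_map]

theorem pvBScan_cur0 (timetable : List (List (String × String))) (class_id day slot : String) :
    (timetable.foldl (pvBStep class_id day slot) (PySem.Set.ofList [], none, [])).2.1 =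
      (timetable.find? (fun c => pvGetKey c "id" == some class_id)).map (fun c => pvGetKey c "room") := by
  rw [pvBScan_cur]

theorem pvBScan_rooms0 (timetable : List (List (String × String))) (class_id day slot : String) :
    (timetable.foldl (pvBStep class_id day slot) (PySem.Set.ofList [], none, [])).2.2 =
      timetable.filterMap pvTruthyRoom := by
  rw [pvBScan_rooms]
  rfl

-- B's running-minimum loop (guard removed) is min? of the Option-prefixed list
theorem pvRunMin_eq (l : List String) :
    ∀ (b : Option String),
    l.foldl (fun best r => if (match best with | none => true | some x => decide (r < x)) then some r else best) b
      = PySem.List.min? (b.toList ++ l) (fun x => x) := by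
  induction l with
  | nil =>
      intro b
      cases b with
      | none => rfl
      | some x => simp [PySem.List.min?_id_cons]
  | cons r t ih =>
      intro b
      cases b with
      | none =>
          simpa using ih (some r)
      | some x =>
          rw [List.foldl_cons]
          by_cases h : r < x
          · have hstep : (if (match (some x : Option String) with | none => true | some b => decide (r < b)) = true then some r else some x) = some r := by
              simp [h]
            rw [hstep, ih (some r)]
            simp [PySem.List.min?_id_cons, List.foldl_cons, min_eq_right (le_of_lt h)]
          · have hstep : (if (match (some x : Option String) with | none => true | some b => decide (r < b)) = true then some r else some x) = some x := by
              simp [h]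
            rw [hstep, ih (some x)]
            simp [PySem.List.min?_id_cons, List.foldl_cons, min_eq_left (le_of_not_gt h)]

-- fold with a guard = guardless fold over the filtered list
theorem pvRunMin_guard (p : String → Bool) (l : List String) :
    ∀ (b : Option String),
    l.foldl (fun best r => if p r && (match best with | none => true | some x => decide (r < x)) then some r else best) b
      = (l.filter p).foldl (fun best r => if (match best with | none => true | some x => decide (r < x)) then some r else best) b := by
  induction l with
  | nil => intro b; rfl
  | cons r t ih =>
      intro b
      by_cases h : p r = true
      · rw [List.foldl_cons, List.filter_cons, if_pos h, List.foldl_cons, ih]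
        congr 1
        rw [h, Bool.true_and]
      · have h' : p r = false := eq_false_of_ne_true h
        rw [List.foldl_cons, List.filter_cons, ih]
        simp [h']

-- A's loop is find?
theorem pvFirstFit_eq_find? (p : String → Bool) (l : List String) : pvFirstFit p l = l.find? p := by
  induction l with
  | nil => rfl
  | cons r rest ih => by_cases h : p r <;> simp [pvFirstFit, List.find?, h, ih]

-- min? (with identity key) depends only on membership
theorem min?_id_mem_congr (l l' : List String) (h : ∀ x, x ∈ l ↔ x ∈ l') :
    PySem.List.min? l (fun x => x) = PySem.List.min? l' (fun x => x) := by
  cases hl : PySem.List.min? l (fun x => x) with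
  | none =>
      rw [PySem.List.min?_eq_none_iff] at hl
      subst hl
      cases hl' : PySem.List.min? l' (fun x => x) with
      | none => rfl
      | some m' =>
          exact absurd ((h m').mpr (PySem.List.min?_mem hl')) (by simp)
  | some m =>
      cases hl' : PySem.List.min? l' (fun x => x) with
      | none =>
          rw [PySem.List.min?_eq_none_iff] at hl'
          subst hl'
          exact absurd ((h m).mp (PySem.List.min?_mem hl)) (by simp)
      | some m' =>
          have h1 : m ≤ m' := PySem.List.min?_isMin hl m' ((h m').mpr (PySem.List.min?_mem hl'))
          have h2 : m' ≤ m := PySem.List.min?_isMin hl' m ((h m).mp (PySem.List.min?_mem hl))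
          exact congrArg some (le_antisymm h1 h2)

theorem foldl_min_of_le (h : String) (f : List String) (hf : ∀ y ∈ f, h ≤ y) :
    f.foldl min h = h := by
  induction f with
  | nil => rfl
  | cons a f' ih =>
      have : min h a = h := min_eq_left (hf a (by simp))
      simp only [List.foldl_cons, this]
      exact ih (fun y hy => hf y (by simp [hy]))

-- on a ≤-sorted list, the first match is the minimum of the matches
theorem find?_eq_min?_filter (p : String → Bool) (l : List String)
    (hs : l.Pairwise (fun a b => a ≤ b)) :
    l.find? p = PySem.List.min? (l.filter p) (fun x => x) := by
  induction l with
  | nil => rfl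
  | cons h t ih =>
      rcases List.pairwise_cons.mp hs with ⟨hht, ht⟩
      by_cases hp : p h
      · simp only [List.find?, hp, List.filter_cons, if_true]
        rw [PySem.List.min?_id_cons]
        have : (t.filter p).foldl min h = h :=
          foldl_min_of_le h (t.filter p) (fun y hy => hht y (List.mem_of_mem_filter hy))
        rw [this]
      · simp only [List.find?, hp, List.filter_cons]
        simp only [Bool.false_eq_true, if_false]
        exact ih ht

-- B's inline preferred check is A's pvPrefOk
theorem pvPrefOk_match (used : PySem.Set (Option String)) (st : String) (pr : Option String) :
    (match pr with
     | none => false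
     | some p => (p != "") && !(PySem.Set.contains used (some p)) && pvCompat st (some p))
      = pvPrefOk used st pr := by
  cases pr <;> rfl

-- ===== VERDICT (by name: the statement is the Claim_ definition above) =====
theorem resolve_room_for_move_py_spec : Claim_equal_resolve_room_for_move_py := by
  intro timetable class_id day slot preferred_room _
  unfold Spec_resolve_room_for_move_py
  have hscan : timetable.foldl (pvBStep class_id day slot) (PySem.Set.ofList [], none, []) =
      (pvUsedRooms timetable class_id day slot,
       (timetable.find? (fun c => pvGetKey c "id" == some class_id)).map (fun c => pvGetKey c "room"),
       timetable.filterMap pvTruthyRoom) :=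
    Prod.ext_iff.mpr ⟨pvBScan_used0 timetable class_id day slot,
      Prod.ext_iff.mpr ⟨pvBScan_cur0 timetable class_id day slot, pvBScan_rooms0 timetable class_id day slot⟩⟩
  unfold resolve_room_for_move_py_alt
  rw [hscan]
  show resolve_room_for_move_py timetable class_id day slot preferred_room =
    pvBChoose (pvUsedRooms timetable class_id day slot)
      (pvRoomType (match (timetable.find? (fun c => pvGetKey c "id" == some class_id)).map (fun c => pvGetKey c "room") with
        | some r => r
        | none => preferred_room))
      (timetable.filterMap pvTruthyRoom) preferred_room
  have hsrc : pvRoomType (match (timetable.find? (fun c => pvGetKey c "id" == some class_id)).map (fun c => pvGetKey c "room") with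
      | some r => r
      | none => preferred_room) = pvSourceType timetable class_id preferred_room := by
    unfold pvSourceType
    cases timetable.find? (fun c => pvGetKey c "id" == some class_id) <;> rfl
  rw [hsrc]
  unfold resolve_room_for_move_py pvBChoose
  set used := pvUsedRooms timetable class_id day slot with hused
  set st := pvSourceType timetable class_id preferred_room with hst
  rw [pvPrefOk_match]
  by_cases hp : pvPrefOk used st preferred_room = true
  · simp [hp]
  · have hp' := eq_false_of_ne_true hp
    simp only [hp', Bool.false_eq_true, if_false]
    rw [pvFirstFit_eq_find?,
      find?_eq_min?_filter _ (PySem.List.sorted (PySem.Set.ofList (timetable.filterMap pvTruthyRoom)) (fun x => x) false)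
        ((PySem.List.sorted_ofList_pairwise_lt (timetable.filterMap pvTruthyRoom)).imp (fun h => le_of_lt h)),
      pvRunMin_guard, pvRunMin_eq]
    simp only [Option.toList, List.nil_append]
    apply min?_id_mem_congr
    intro x
    simp only [List.mem_filter, PySem.List.mem_sorted, PySem.Set.mem_ofList]
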